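-- pv_equiv track=rewrite | github.com/gatewaymanish/code_practice | codes/array/arrange_signs.py | arrange_signs
-- ===== SOURCE A (Python) =====
-- def arrange_signs(arr):
--
--     left = []
--     right = []
--
--     for i in arr:
--         if i < 0:
--             left.append(i)
--         else:
--             right.append(i)
--
--     left.extend(right)
--     return left
-- ===== SOURCE B (Python) =====
-- def arrange_signs(arr):
--     # negatives (key False) before non-negatives (key True); stable sort keeps order
--     return sorted(arr, key=lambda x: x >= 0)
-- ===== Notes on version B (the rewrite author's own statement) =====
-- stated objective: idiomatic
-- what changed: Replaces the two-accumulator partition loop with a single stable sort keyed on x >= 0, relying on sort stability to keep each group's original order.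
import Mathlib
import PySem

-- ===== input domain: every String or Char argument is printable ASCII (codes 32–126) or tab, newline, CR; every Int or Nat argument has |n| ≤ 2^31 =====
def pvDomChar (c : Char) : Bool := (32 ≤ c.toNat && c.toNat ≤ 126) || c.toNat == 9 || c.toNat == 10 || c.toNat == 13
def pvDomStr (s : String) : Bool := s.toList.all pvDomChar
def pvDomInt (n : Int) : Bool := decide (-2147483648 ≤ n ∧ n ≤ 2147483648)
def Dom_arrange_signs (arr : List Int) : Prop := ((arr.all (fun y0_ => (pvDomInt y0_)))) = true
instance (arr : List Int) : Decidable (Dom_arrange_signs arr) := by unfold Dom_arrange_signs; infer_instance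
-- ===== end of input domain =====

-- B replaces A's two-accumulator partition loop with a single stable sort keyed on x >= 0 (idiomatic; not faster).


-- ===== PORT A =====
-- for i in arr: append to left (i < 0) or right (else); then left.extend(right)
def arrange_signs (arr : List Int) : List Int :=
  let st := arr.foldl
    (fun (st : List Int × List Int) i =>
      if i < 0 then (st.1 ++ [i], st.2) else (st.1, st.2 ++ [i]))
    ([], [])
  st.1 ++ st.2

-- ===== PORT B =====
-- sorted(arr, key=lambda x: x >= 0)
def arrange_signs_alt (arr : List Int) : List Int :=
  PySem.List.sorted arr (fun x => decide ((0:Int) ≤ x)) false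

-- ===== PRECONDITION & SPEC =====
def Spec_arrange_signs (arr : List Int) (out : List Int) : Prop := out = arrange_signs_alt arr
instance (arr : List Int) (out : List Int) : Decidable (Spec_arrange_signs arr out) := by unfold Spec_arrange_signs; infer_instance

-- ===== CLAIM (what is proved, stated in full; the proofs are below) =====
def Claim_equal_arrange_signs : Prop := ∀ (arr : List Int), Dom_arrange_signs arr → Spec_arrange_signs arr (arrange_signs arr)

-- ===== LEMMAS AND PROOFS =====

-- inserting x before the whole block R, past the whole block L
theorem insertBy_block (before : Int → Int → Bool) (x : Int) (L R : List Int)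
    (hL : ∀ y ∈ L, before x y = false) (hR : ∀ y ∈ R, before x y = true) :
    PySem.List.insertBy before x (L ++ R) = L ++ x :: R := by
  induction L with
  | nil =>
    cases R with
    | nil => rfl
    | cons y ys => simp [PySem.List.insertBy, hR y (by simp)]
  | cons a L' ih =>
    simp [PySem.List.insertBy, hL a (by simp)]
    exact ih (fun y hy => hL y (by simp [hy]))

-- the insertion-sort loop of B keeps the state partitioned: negatives then non-negatives
theorem sorted_loop (xs : List Int) (L R : List Int)
    (hL : ∀ y ∈ L, y < 0) (hR : ∀ y ∈ R, (0:Int) ≤ y) :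
    xs.foldl (fun acc x =>
        PySem.List.insertBy
          (fun a b => decide ((decide ((0:Int) ≤ a)) < (decide ((0:Int) ≤ b)))) x acc)
      (L ++ R)
    = (L ++ xs.filter (fun x => decide (x < 0))) ++ (R ++ xs.filter (fun x => decide ((0:Int) ≤ x))) := by
  induction xs generalizing L R with
  | nil => simp
  | cons x xs ih =>
    simp only [List.foldl_cons]
    by_cases hx : x < 0
    · have hxk : decide ((0:Int) ≤ x) = false := by simp [not_le.mpr hx]
      rw [insertBy_block _ x L R
          (fun y hy => by simp [hxk, not_le.mpr (hL y hy)])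
          (fun y hy => by simp [hxk, decide_eq_true (hR y hy)])]
      have h := ih (L ++ [x]) R
        (by intro y hy; rcases List.mem_append.mp hy with h | h
            · exact hL y h
            · simp at h; simpa [h] using hx)
        hR
      simp only [List.append_assoc, List.singleton_append] at h
      rw [h]
      simp [List.filter_cons, hx, not_le.mpr hx]
    · have hxk : decide ((0:Int) ≤ x) = true := decide_eq_true (not_lt.mp hx)
      rw [PySem.List.insertBy_of_forall_not_before _ x (L ++ R)
          (by intro y hy
              simp only [hxk]
              cases hdy : decide ((0:Int) ≤ y) <;> rfl)]
      have h := ih L (R ++ [x]) hL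
        (by intro y hy; rcases List.mem_append.mp hy with h | h
            · exact hR y h
            · simp at h; simpa [h] using not_lt.mp hx)
      rw [List.append_assoc, h]
      simp [hx, not_lt.mp hx]

-- the partition loop of A, characterised by filters
theorem a_loop (xs : List Int) (L R : List Int) :
    xs.foldl
      (fun (st : List Int × List Int) i =>
        if i < 0 then (st.1 ++ [i], st.2) else (st.1, st.2 ++ [i]))
      (L, R)
    = (L ++ xs.filter (fun x => decide (x < 0)), R ++ xs.filter (fun x => decide ((0:Int) ≤ x))) := by
  induction xs generalizing L R with
  | nil => simp
  | cons x xs ih =>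
    simp only [List.foldl_cons]
    by_cases hx : x < 0
    · rw [if_pos hx, ih]
      simp [hx, not_le.mpr hx]
    · rw [if_neg hx, ih]
      simp [hx, not_lt.mp hx]

-- ===== VERDICT (by name: the statement is the Claim_ definition above) =====
theorem arrange_signs_spec : Claim_equal_arrange_signs := by
  intro arr _
  show arrange_signs arr = arrange_signs_alt arr
  unfold arrange_signs arrange_signs_alt
  rw [PySem.List.sorted_eq_foldl_insertBy]
  have hb := sorted_loop arr [] [] (by simp) (by simp)
  simp only [List.nil_append] at hb
  rw [hb, a_loop]
  simp
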